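-- pv_equiv track=rewrite | github.com/TJEWH/Object-Centric-Super-Variants | Inter_Lane_Summarization.py | __merge_interaction_mappings
-- ===== SOURCE A (Python) =====
-- def __merge_interaction_mappings(mappings):
--     '''
--     Pre-processes the mappings from the summarization for later alignment by merging the mappings for each Super Lane.
--     :param mappings: The mappings of original interaction points to new indices in the summarized lanes for each lane in the Super Variant
--     :type mappings: list
--     :return: Each interaction point of the final Super Lanes and their current positions in the involved lanes
--     :rtype: dict
--     '''
--     merged_mappings = {}
--     # merge the individual dictionaries for all lanes
--     for i in range(len(mappings)):
--         mapping = mappings[i][1]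
--         for key in mapping.keys():
--             positions = {}
--             positions[mappings[i][0]] = mappings[i][1][key]
--             for k in range(i+1, len(mappings)):
--                 if(key in list(mappings[k][1].keys())):
--                     positions[mappings[k][0]] = mappings[k][1][key]
--             if(len(positions.keys()) > 1 and key not in merged_mappings.keys()):
--                 merged_mappings[key] = positions
--
--     return merged_mappings
-- ===== SOURCE B (Python) =====
-- def __merge_interaction_mappings(mappings):
--     # Single-pass inverted index: group (lane, position) by key, then keep keys present in more than one lane.
--     index = {}
--     for lane, mapping in mappings:
--         for key, position in mapping.items():
--             index.setdefault(key, {})[lane] = position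
--     return {key: positions for key, positions in index.items() if len(positions) > 1}
-- ===== Notes on version B (the rewrite author's own statement) =====
-- stated objective: faster
-- what changed: Replaced the per-key rescans of all later lanes (for every key of every lane) by a single pass that builds an inverted index key -> {lane: position} and then keeps the keys present in more than one lane.
import Mathlib
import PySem

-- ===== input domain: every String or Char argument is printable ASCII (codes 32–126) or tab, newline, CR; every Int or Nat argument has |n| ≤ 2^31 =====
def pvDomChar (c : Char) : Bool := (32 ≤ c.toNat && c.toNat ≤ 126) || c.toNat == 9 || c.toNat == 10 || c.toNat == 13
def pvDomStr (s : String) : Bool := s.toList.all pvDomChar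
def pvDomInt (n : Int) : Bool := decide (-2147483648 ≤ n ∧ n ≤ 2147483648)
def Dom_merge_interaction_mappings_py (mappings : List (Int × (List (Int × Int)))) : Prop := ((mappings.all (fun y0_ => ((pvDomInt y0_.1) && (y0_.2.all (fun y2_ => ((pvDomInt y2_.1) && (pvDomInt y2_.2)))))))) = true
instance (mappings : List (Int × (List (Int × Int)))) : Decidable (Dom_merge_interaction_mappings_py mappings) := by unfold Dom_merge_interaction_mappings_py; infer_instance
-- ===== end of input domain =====

-- B replaces A's per-key rescans of all later lanes by one pass building an inverted index
-- key -> {lane: position}, then keeps keys present in more than one lane (faster: asymptotic).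


-- ===== PORT A =====
-- outer loop 'for i in range(len(mappings))' with the inner scan 'for k in range(i+1, len(mappings))'
-- rendered as structural recursion on the list: head = mappings[i], tail = mappings[i+1:].
def mergeAuxA (merged : PySem.Dict Int (PySem.Dict Int Int)) :
    List (Int × List (Int × Int)) → PySem.Dict Int (PySem.Dict Int Int)
  | [] => merged
  | (lane, ps) :: rest =>
    let d := PySem.Dict.ofList ps
    let merged' := d.keys.foldl (fun m key =>
      let positions := rest.foldl (fun p q =>
        let dk := PySem.Dict.ofList q.2
        if dk.contains key then p.insert q.1 (dk.getD key 0) else p)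
        (PySem.Dict.empty.insert lane (d.getD key 0))
      if positions.keys.length > 1 && !(m.contains key) then m.insert key positions else m)
      merged
    mergeAuxA merged' rest

def merge_interaction_mappings_py (mappings : List (Int × (List (Int × Int)))) : List (Int × List (Int × Int)) :=
  (mergeAuxA PySem.Dict.empty mappings).items.map (fun kv => (kv.1, kv.2.items))

-- ===== PORT B =====
-- single pass: index.setdefault(key, {})[lane] = position  ==  modify key {} (insert lane position)
def merge_interaction_mappings_py_alt (mappings : List (Int × (List (Int × Int)))) : List (Int × List (Int × Int)) :=
  let index : PySem.Dict Int (PySem.Dict Int Int) :=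
    mappings.foldl (fun idx q =>
      (PySem.Dict.ofList q.2).items.foldl (fun idx kv =>
        idx.modify kv.1 PySem.Dict.empty (fun p => p.insert q.1 kv.2)) idx)
      PySem.Dict.empty
  (index.items.filter (fun kv => kv.2.size > 1)).map (fun kv => (kv.1, kv.2.items))

-- ===== PRECONDITION & SPEC =====
def Spec_merge_interaction_mappings_py (mappings : List (Int × (List (Int × Int)))) (out : List (Int × List (Int × Int))) : Prop := out = merge_interaction_mappings_py_alt mappings
instance (mappings : List (Int × (List (Int × Int)))) (out : List (Int × List (Int × Int))) : Decidable (Spec_merge_interaction_mappings_py mappings out) := by unfold Spec_merge_interaction_mappings_py; infer_instance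

-- ===== CLAIM (what is proved, stated in full; the proofs are below) =====
def Claim_equal_merge_interaction_mappings_py : Prop := ∀ (mappings : List (Int × (List (Int × Int)))), Dom_merge_interaction_mappings_py mappings → Spec_merge_interaction_mappings_py mappings (merge_interaction_mappings_py mappings)

-- ===== LEMMAS AND PROOFS =====

-- the positions dict for a key, folded over a list of lanes starting from p (the inner loops of both programs)
def pvPos (p : PySem.Dict Int Int) (key : Int) (l : List (Int × List (Int × Int))) : PySem.Dict Int Int :=
  l.foldl (fun p q =>
    let dk := PySem.Dict.ofList q.2
    if dk.contains key then p.insert q.1 (dk.getD key 0) else p) p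

def pvPairs (key : Int) (l : List (Int × List (Int × Int))) : List (Int × Int) :=
  l.filterMap (fun q =>
    if (PySem.Dict.ofList q.2).contains key then some (q.1, (PySem.Dict.ofList q.2).getD key 0) else none)

def pvQual (l : List (Int × List (Int × Int))) (k : Int) : Bool :=
  decide ((pvPos PySem.Dict.empty k l).keys.length > 1)

def pvKeys (l : List (Int × List (Int × Int))) : List Int :=
  PySem.Set.ofList (l.flatMap (fun q => (PySem.Dict.ofList q.2).keys))

def pvStepA (lane : Int) (ps : List (Int × Int)) (rest : List (Int × List (Int × Int)))
    (m : PySem.Dict Int (PySem.Dict Int Int)) (key : Int) : PySem.Dict Int (PySem.Dict Int Int) :=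
  let positions := pvPos (PySem.Dict.empty.insert lane ((PySem.Dict.ofList ps).getD key 0)) key rest
  if positions.keys.length > 1 && !(m.contains key) then m.insert key positions else m

def pvIdxStep (idx : PySem.Dict Int (PySem.Dict Int Int)) (q : Int × List (Int × Int)) :
    PySem.Dict Int (PySem.Dict Int Int) :=
  (PySem.Dict.ofList q.2).items.foldl (fun idx kv =>
    idx.modify kv.1 PySem.Dict.empty (fun p => p.insert q.1 kv.2)) idx

lemma mergeAuxA_cons (merged : PySem.Dict Int (PySem.Dict Int Int)) (lane : Int)
    (ps : List (Int × Int)) (rest : List (Int × List (Int × Int))) :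
    mergeAuxA merged ((lane, ps) :: rest)
      = mergeAuxA ((PySem.Dict.ofList ps).keys.foldl (pvStepA lane ps rest) merged) rest := rfl

lemma altB_index (mappings : List (Int × List (Int × Int))) :
    merge_interaction_mappings_py_alt mappings
      = ((mappings.foldl pvIdxStep PySem.Dict.empty).items.filter
          (fun kv => kv.2.size > 1)).map (fun kv => (kv.1, kv.2.items)) := rfl

lemma pvPos_cons_no {ps : List (Int × Int)} {key : Int}
    (h : (PySem.Dict.ofList ps).contains key = false) (p : PySem.Dict Int Int)
    (lane : Int) (rest : List (Int × List (Int × Int))) :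
    pvPos p key ((lane, ps) :: rest) = pvPos p key rest := by
  simp [pvPos, h]

lemma pvPos_cons_yes {ps : List (Int × Int)} {key : Int}
    (h : (PySem.Dict.ofList ps).contains key = true) (p : PySem.Dict Int Int)
    (lane : Int) (rest : List (Int × List (Int × Int))) :
    pvPos p key ((lane, ps) :: rest)
      = pvPos (p.insert lane ((PySem.Dict.ofList ps).getD key 0)) key rest := by
  simp [pvPos, h]

lemma pvPos_eq_pairs (key : Int) (l : List (Int × List (Int × Int))) : ∀ p,
    pvPos p key l = (pvPairs key l).foldl (fun p kv => p.insert kv.1 kv.2) p := by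
  induction l with
  | nil => intro p; rfl
  | cons q rest ih =>
    intro p
    by_cases h : (PySem.Dict.ofList q.2).contains key = true
    · obtain ⟨lane, ps⟩ := q
      rw [pvPos_cons_yes h, ih]
      simp [pvPairs, h]
    · obtain ⟨lane, ps⟩ := q
      rw [pvPos_cons_no (eq_false_of_ne_true h), ih]
      simp [pvPairs, eq_false_of_ne_true h]

lemma keys_pvPos (p : PySem.Dict Int Int) (key : Int) (l : List (Int × List (Int × Int))) :
    (pvPos p key l).keys = PySem.Set.update p.keys ((pvPairs key l).map Prod.fst) := by
  rw [pvPos_eq_pairs]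
  exact PySem.Dict.keys_foldl_insert_key _ _ _ _

lemma length_ofList_le_cons (a : Int) (xs : List Int) :
    (PySem.Set.ofList xs).length ≤ (PySem.Set.ofList (a :: xs)).length := by
  have h1 : PySem.Set.ofList (a :: xs) = PySem.Set.update (PySem.Set.ofList [a]) xs :=
    PySem.Set.ofList_append [a] xs
  have h2 : PySem.Set.ofList [a] = [a] := rfl
  rw [h1, h2, PySem.Set.update_eq_append_filter]
  have hsplit := List.length_eq_length_filter_add (l := PySem.Set.ofList xs) (fun y => !(PySem.Set.contains [a] y))
  have hand : ∀ y ∈ (PySem.Set.ofList xs).filter (fun y => !(!(PySem.Set.contains [a] y))), y = a := by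
    intro y hy
    have := List.of_mem_filter hy
    simp only [Bool.not_not] at this
    have := List.mem_of_elem_eq_true this
    simpa using this
  have hnd : ((PySem.Set.ofList xs).filter (fun y => !(!(PySem.Set.contains [a] y)))).Nodup :=
    (PySem.Set.nodup_ofList xs).filter _
  have hle1 : ((PySem.Set.ofList xs).filter (fun y => !(!(PySem.Set.contains [a] y)))).length ≤ 1 := by
    rcases hf : (PySem.Set.ofList xs).filter (fun y => !(!(PySem.Set.contains [a] y))) with _ | ⟨x, _ | ⟨y, t⟩⟩
    · simp
    · simp
    · exfalso
      rw [hf] at hand hnd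
      have hx := hand x (by simp)
      have hy := hand y (by simp)
      subst hx; subst hy
      simp at hnd
  simp only [List.length_append, List.length_cons, List.length_nil]
  simp only [Bool.not_not] at hsplit hle1
  omega

lemma pvQual_cons_no {ps : List (Int × Int)} {k : Int}
    (h : (PySem.Dict.ofList ps).contains k = false) (lane : Int)
    (rest : List (Int × List (Int × Int))) :
    pvQual ((lane, ps) :: rest) k = pvQual rest k := by
  simp [pvQual, pvPos_cons_no h]

lemma pvQual_mono {ps : List (Int × Int)} {k : Int}
    (h : (PySem.Dict.ofList ps).contains k = true) (lane : Int)
    {rest : List (Int × List (Int × Int))}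
    (hq : pvQual ((lane, ps) :: rest) k = false) : pvQual rest k = false := by
  simp only [pvQual, decide_eq_false_iff_not, not_lt] at hq ⊢
  have e1 : (pvPos PySem.Dict.empty k ((lane, ps) :: rest)).keys
      = PySem.Set.ofList (((pvPairs k ((lane, ps) :: rest))).map Prod.fst) := by
    rw [keys_pvPos]
    simp [PySem.Dict.keys_empty, PySem.Set.update_nil_left]
  have e2 : (pvPos PySem.Dict.empty k rest).keys
      = PySem.Set.ofList ((pvPairs k rest).map Prod.fst) := by
    rw [keys_pvPos]
    simp [PySem.Dict.keys_empty, PySem.Set.update_nil_left]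
  have e3 : pvPairs k ((lane, ps) :: rest)
      = (lane, (PySem.Dict.ofList ps).getD k 0) :: pvPairs k rest := by
    simp [pvPairs, h]
  rw [e1, e3] at hq
  rw [e2]
  have := length_ofList_le_cons lane ((pvPairs k rest).map Prod.fst)
  simp only [List.map_cons] at hq
  omega

lemma pvFilterMapCongr {α β : Type} (l : List α) (p q : α → Bool) (F G : α → β)
    (h : ∀ a ∈ l, p a = q a ∧ (q a = true → F a = G a)) :
    (l.filter p).map F = (l.filter q).map G := by
  induction l with
  | nil => rfl
  | cons a t ih =>
    obtain ⟨hpq, hFG⟩ := h a (List.mem_cons_self ..)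
    have ht := ih (fun b hb => h b (List.mem_cons_of_mem _ hb))
    cases hqa : q a
    · simp [hpq, hqa, ht]
    · simp [hpq, hqa, ht, hFG hqa]

lemma pvStepA_yes {ps : List (Int × Int)} {key : Int}
    (h : (PySem.Dict.ofList ps).contains key = true) (lane : Int)
    (rest : List (Int × List (Int × Int))) (m : PySem.Dict Int (PySem.Dict Int Int)) :
    pvStepA lane ps rest m key
      = if pvQual ((lane, ps) :: rest) key && !(m.contains key)
          then m.insert key (pvPos PySem.Dict.empty key ((lane, ps) :: rest)) else m := by
  unfold pvStepA
  rw [← pvPos_cons_yes h]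
  rfl

lemma innerA (lane : Int) (ps : List (Int × Int)) (rest : List (Int × List (Int × Int))) :
    ∀ (ks : List Int) (m : PySem.Dict Int (PySem.Dict Int Int)), m.keys.Nodup → ks.Nodup →
    (∀ k ∈ ks, (PySem.Dict.ofList ps).contains k = true) →
    (ks.foldl (pvStepA lane ps rest) m).items
        = m.items ++ (ks.filter (fun k => pvQual ((lane, ps) :: rest) k && !(m.contains k))).map
            (fun k => (k, pvPos PySem.Dict.empty k ((lane, ps) :: rest)))
      ∧ (ks.foldl (pvStepA lane ps rest) m).keys.Nodup
      ∧ ∀ k : Int, (ks.foldl (pvStepA lane ps rest) m).contains k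
          = (m.contains k || (decide (k ∈ ks) && pvQual ((lane, ps) :: rest) k)) := by
  intro ks
  induction ks with
  | nil =>
    intro m hm _ _
    exact ⟨by simp, hm, fun k => by simp⟩
  | cons key ks ih =>
    intro m hm hnd hall
    have hd : (PySem.Dict.ofList ps).contains key = true := hall key (List.mem_cons_self ..)
    have hndk : key ∉ ks := (List.nodup_cons.mp hnd).1
    have hnd' : ks.Nodup := (List.nodup_cons.mp hnd).2
    have hall' : ∀ k ∈ ks, (PySem.Dict.ofList ps).contains k = true :=
      fun k hk => hall k (List.mem_cons_of_mem _ hk)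
    simp only [List.foldl_cons, List.filter_cons]
    rw [pvStepA_yes hd]
    by_cases hq : (pvQual ((lane, ps) :: rest) key && !(m.contains key)) = true
    · rw [if_pos hq, hq]
      have hq' := hq
      simp only [Bool.and_eq_true] at hq'
      have hmc : m.contains key = false := by simpa using hq'.2
      have hqt : pvQual ((lane, ps) :: rest) key = true := hq'.1
      obtain ⟨hi, hn, hc⟩ := ih (m.insert key (pvPos PySem.Dict.empty key ((lane, ps) :: rest)))
        (PySem.Dict.nodup_keys_insert _ _ _ hm) hnd' hall'
      refine ⟨?_, hn, ?_⟩
      · rw [hi, PySem.Dict.items_insert_of_not_contains _ _ hmc]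
        have hfc : ks.filter (fun k => pvQual ((lane, ps) :: rest) k
              && !((m.insert key (pvPos PySem.Dict.empty key ((lane, ps) :: rest))).contains k))
            = ks.filter (fun k => pvQual ((lane, ps) :: rest) k && !(m.contains k)) := by
          apply List.filter_congr
          intro k hk
          have hne : k ≠ key := fun e => hndk (e ▸ hk)
          rw [PySem.Dict.contains_insert]
          have hb : (k == key) = false := by simpa using hne
          simp [hb]
        rw [hfc]
        simp [List.append_assoc]
      · intro k
        rw [hc k, PySem.Dict.contains_insert]
        by_cases hk : k = key
        · subst hk
          simp [hqt]
        · simp only [List.mem_cons]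
          have : (k == key) = false := by simpa using hk
          simp [this, hk]
    · rw [if_neg hq]
      have hqf : (pvQual ((lane, ps) :: rest) key && !(m.contains key)) = false := by
        simpa using hq
      rw [hqf]
      obtain ⟨hi, hn, hc⟩ := ih m hm hnd' hall'
      refine ⟨hi, hn, ?_⟩
      intro k
      rw [hc k]
      by_cases hk : k = key
      · subst hk
        have hknotin : decide (k ∈ ks) = false := by simpa using hndk
        cases hcm : m.contains k
        · have hql : pvQual ((lane, ps) :: rest) k = false := by
            cases hql : pvQual ((lane, ps) :: rest) k
            · rfl
            · exact absurd (by simp [hql, hcm]) (fun h => hq h)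
          simp [hql, hknotin]
        · simp
      · simp [List.mem_cons, hk]

lemma A_char : ∀ (l : List (Int × List (Int × Int))) (merged : PySem.Dict Int (PySem.Dict Int Int)),
    merged.keys.Nodup →
    (mergeAuxA merged l).items
      = merged.items ++ ((pvKeys l).filter (fun k => pvQual l k && !(merged.contains k))).map
          (fun k => (k, pvPos PySem.Dict.empty k l)) := by
  intro l
  induction l with
  | nil =>
    intro merged hm
    simp [mergeAuxA, pvKeys]
  | cons q rest ih =>
    obtain ⟨lane, ps⟩ := q
    intro merged hm
    rw [mergeAuxA_cons]
    obtain ⟨hi, hn, hc⟩ := innerA lane ps rest (PySem.Dict.ofList ps).keys merged hm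
      (PySem.Dict.nodup_keys_ofList ps)
      (fun k hk => (PySem.Dict.contains_iff_mem_keys _ _).mpr hk)
    rw [ih _ hn, hi]
    have hK : pvKeys ((lane, ps) :: rest)
        = (PySem.Dict.ofList ps).keys
          ++ (pvKeys rest).filter (fun y => !(PySem.Set.contains (PySem.Dict.ofList ps).keys y)) := by
      show PySem.Set.ofList ((PySem.Dict.ofList ps).keys ++ rest.flatMap (fun q => (PySem.Dict.ofList q.2).keys)) = _
      rw [PySem.Set.ofList_append,
        PySem.Set.ofList_eq_self_of_nodup _ (PySem.Dict.nodup_keys_ofList ps),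
        PySem.Set.update_eq_append_filter]
      rfl
    rw [hK, List.filter_append, List.map_append, ← List.append_assoc, List.filter_filter]
    congr 1
    apply pvFilterMapCongr
    intro k hk
    by_cases hmem : k ∈ (PySem.Dict.ofList ps).keys
    · have hdc : (PySem.Dict.ofList ps).contains k = true :=
        (PySem.Dict.contains_iff_mem_keys _ _).mpr hmem
      have hsc : PySem.Set.contains (PySem.Dict.ofList ps).keys k = true := by
        simpa [PySem.Set.contains] using hmem
      constructor
      · rw [hc k]
        cases hql : pvQual ((lane, ps) :: rest) k
        · have := pvQual_mono hdc lane hql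
          simp [this]
        · have hmemd : decide (k ∈ (PySem.Dict.ofList ps).keys) = true := by simpa using hmem
          simp [hmemd]
      · intro habs
        exfalso
        rw [hsc] at habs
        simp at habs
    · have hdc : (PySem.Dict.ofList ps).contains k = false := by
        cases hx : (PySem.Dict.ofList ps).contains k
        · rfl
        · exact absurd ((PySem.Dict.contains_iff_mem_keys _ _).mp hx) hmem
      have hsc : PySem.Set.contains (PySem.Dict.ofList ps).keys k = false := by
        simpa [PySem.Set.contains] using hmem
      have hmemd : decide (k ∈ (PySem.Dict.ofList ps).keys) = false := by simpa using hmem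
      constructor
      · rw [hc k, pvQual_cons_no hdc]
        simp [hmemd]
      · intro _
        rw [pvPos_cons_no hdc]

lemma innerB_getD : ∀ (pairs : List (Int × Int)) (idx : PySem.Dict Int (PySem.Dict Int Int)) (lane k : Int),
    (pairs.map Prod.fst).Nodup →
    (pairs.foldl (fun idx kv => idx.modify kv.1 PySem.Dict.empty (fun p => p.insert lane kv.2)) idx).getD k PySem.Dict.empty
      = if (PySem.Dict.mk pairs).contains k
          then (idx.getD k PySem.Dict.empty).insert lane ((PySem.Dict.mk pairs).getD k 0)
          else idx.getD k PySem.Dict.empty := by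
  intro pairs
  induction pairs with
  | nil => intro idx lane k _; rfl
  | cons kv rest ih =>
    intro idx lane k hnd
    obtain ⟨k1, v1⟩ := kv
    simp only [List.map_cons, List.nodup_cons] at hnd
    obtain ⟨hk1, hrest⟩ := hnd
    simp only [List.foldl_cons]
    rw [ih _ lane k hrest]
    by_cases hk : k = k1
    · subst hk
      have hres : (PySem.Dict.mk rest).contains k = false := by
        simp only [PySem.Dict.contains, List.any_eq_false]
        intro p hp hEq
        have hpk : p.1 = k := by simpa using hEq
        exact hk1 (List.mem_map.mpr ⟨p, hp, hpk⟩)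
      rw [hres]
      simp only [Bool.false_eq_true, if_false]
      have hcons : (PySem.Dict.mk ((k, v1) :: rest)).contains k = true := by
        simp [PySem.Dict.contains]
      rw [hcons, if_pos rfl]
      rw [PySem.Dict.getD_modify_self]
      have : (PySem.Dict.mk ((k, v1) :: rest)).getD k 0 = v1 := by
        rw [PySem.Dict.getD_eq_get?_getD, PySem.Dict.get?_mk_cons]
        simp
      rw [this]
    · rw [PySem.Dict.getD_modify_of_ne _ _ _ hk]
      have hcont : (PySem.Dict.mk ((k1, v1) :: rest)).contains k = (PySem.Dict.mk rest).contains k := by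
        simp only [PySem.Dict.contains, List.any_cons]
        have : (k1 == k) = false := by simpa using fun hEq => hk hEq.symm
        simp [this]
      have hgetD : (PySem.Dict.mk ((k1, v1) :: rest)).getD k 0 = (PySem.Dict.mk rest).getD k 0 := by
        rw [PySem.Dict.getD_eq_get?_getD, PySem.Dict.get?_mk_cons]
        have : (k1 == k) = false := by simpa using fun hEq => hk hEq.symm
        rw [this]
        simp [PySem.Dict.getD_eq_get?_getD]
      rw [hcont, hgetD]

lemma stepB_getD (idx : PySem.Dict Int (PySem.Dict Int Int)) (q : Int × List (Int × Int)) (k : Int) :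
    (pvIdxStep idx q).getD k PySem.Dict.empty
      = if (PySem.Dict.ofList q.2).contains k
          then (idx.getD k PySem.Dict.empty).insert q.1 ((PySem.Dict.ofList q.2).getD k 0)
          else idx.getD k PySem.Dict.empty := by
  have hnd : ((PySem.Dict.ofList q.2).items.map Prod.fst).Nodup := PySem.Dict.nodup_keys_ofList q.2
  exact innerB_getD (PySem.Dict.ofList q.2).items idx q.1 k hnd

lemma idx_getD : ∀ (l : List (Int × List (Int × Int))) (idx : PySem.Dict Int (PySem.Dict Int Int)) (k : Int),
    (l.foldl pvIdxStep idx).getD k PySem.Dict.empty = pvPos (idx.getD k PySem.Dict.empty) k l := by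
  intro l
  induction l with
  | nil => intro idx k; rfl
  | cons q rest ih =>
    intro idx k
    obtain ⟨lane, ps⟩ := q
    simp only [List.foldl_cons]
    rw [ih, stepB_getD]
    by_cases h : (PySem.Dict.ofList ps).contains k = true
    · rw [if_pos h, pvPos_cons_yes h]
    · rw [if_neg (by simp [eq_false_of_ne_true h]), pvPos_cons_no (eq_false_of_ne_true h)]

lemma stepB_keys (idx : PySem.Dict Int (PySem.Dict Int Int)) (q : Int × List (Int × Int)) :
    (pvIdxStep idx q).keys = PySem.Set.update idx.keys (PySem.Dict.ofList q.2).keys :=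
  PySem.Dict.keys_foldl_modify_key _ _ _ _ _

lemma idx_keys : ∀ (l : List (Int × List (Int × Int))) (idx : PySem.Dict Int (PySem.Dict Int Int)),
    (l.foldl pvIdxStep idx).keys
      = PySem.Set.update idx.keys (l.flatMap (fun q => (PySem.Dict.ofList q.2).keys)) := by
  intro l
  induction l with
  | nil => intro idx; simp [PySem.Set.update_nil]
  | cons q rest ih =>
    intro idx
    simp only [List.foldl_cons, List.flatMap_cons]
    rw [ih, stepB_keys, PySem.Set.update_append]

lemma idx_nodup : ∀ (l : List (Int × List (Int × Int))) (idx : PySem.Dict Int (PySem.Dict Int Int)),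
    idx.keys.Nodup → (l.foldl pvIdxStep idx).keys.Nodup := by
  intro l
  induction l with
  | nil => intro idx h; exact h
  | cons q rest ih =>
    intro idx h
    exact ih _ (PySem.Dict.nodup_keys_foldl_modify_key _ _ _ _ _ h)

lemma B_items (mappings : List (Int × List (Int × Int))) :
    (mappings.foldl pvIdxStep PySem.Dict.empty).items
      = (pvKeys mappings).map (fun k => (k, pvPos PySem.Dict.empty k mappings)) := by
  have hnodup : (mappings.foldl pvIdxStep PySem.Dict.empty).keys.Nodup :=
    idx_nodup _ _ (by simp [PySem.Dict.keys_empty])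
  rw [PySem.Dict.items_eq_map_keys _ hnodup PySem.Dict.empty, idx_keys,
    PySem.Dict.keys_empty, PySem.Set.update_nil_left]
  apply List.map_congr_left
  intro k _
  rw [idx_getD, PySem.Dict.getD_empty]

-- ===== VERDICT (by name: the statement is the Claim_ definition above) =====
theorem merge_interaction_mappings_py_spec : Claim_equal_merge_interaction_mappings_py := by
  unfold Claim_equal_merge_interaction_mappings_py
  intro mappings _
  unfold Spec_merge_interaction_mappings_py
  rw [altB_index, B_items]
  show (mergeAuxA PySem.Dict.empty mappings).items.map (fun kv => (kv.1, kv.2.items)) = _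
  rw [A_char mappings PySem.Dict.empty (by simp [PySem.Dict.keys_empty]), List.filter_map]
  have hpred : (pvKeys mappings).filter
        ((fun kv => decide (kv.2.size > 1)) ∘ (fun k => (k, pvPos PySem.Dict.empty k mappings)))
      = (pvKeys mappings).filter
          (fun k => pvQual mappings k
            && !((PySem.Dict.empty : PySem.Dict Int (PySem.Dict Int Int)).contains k)) := by
    apply List.filter_congr
    intro k _
    simp [pvQual, PySem.Dict.size, PySem.Dict.keys, PySem.Dict.contains_empty]
  rw [hpred]
  simp [PySem.Dict.empty]
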